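-- pv_equiv track=rewrite | github.com/echizentm/string_attractors | stringattractors/lz77.py | _make_directive_list
-- ===== SOURCE A (Python) =====
-- from typing import List, Optional, Tuple
--
-- def _make_directive_list(text: str) -> List[Tuple[int, int, Optional[str]]]:
--     directive_list: List[Tuple[int, int, Optional[str]]] = []
--     begin = 0
--     while begin < len(text):
--         index = begin
--         subtext = text[begin]
--         ch: Optional[str] = text[begin]
--         for end in range(begin + 1, len(text) + 1):
--             new_subtext = text[begin:end]
--             new_index = text.find(new_subtext)
--             if new_index == -1 or new_index + len(new_subtext) > begin:
--                 break
--
--             index = new_index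
--             subtext = new_subtext
--             ch = None
--
--         directive_list.append((index, index + len(subtext), ch))
--         begin += len(subtext)
--
--     return directive_list
-- ===== SOURCE B (Python) =====
-- from typing import List, Optional, Tuple
--
-- def _make_directive_list(text: str) -> List[Tuple[int, int, Optional[str]]]:
--     # Exponential (galloping) + binary search over the phrase length:
--     # feasibility of a phrase length is monotone, so each phrase is found with
--     # O(log L) find() calls per phrase instead of one per added character (alternative strategy).
--     n = len(text)
--     directive_list: List[Tuple[int, int, Optional[str]]] = []
--     begin = 0
--     while begin < n:
--         limit = n - begin
--         lo, step = 0, 1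
--         while lo + step <= limit and text.find(text[begin:begin + lo + step]) + lo + step <= begin:
--             lo += step
--             step *= 2
--         hi = min(lo + step - 1, limit)
--         while lo < hi:
--             mid = (lo + hi + 1) // 2
--             if text.find(text[begin:begin + mid]) + mid <= begin:
--                 lo = mid
--             else:
--                 hi = mid - 1
--         if lo == 0:
--             directive_list.append((begin, begin + 1, text[begin]))
--             begin += 1
--         else:
--             idx = text.find(text[begin:begin + lo])
--             directive_list.append((idx, idx + lo, None))
--             begin += lo
--     return directive_list
-- ===== Notes on version B (the rewrite author's own statement) =====
-- stated objective: alternative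
-- what changed: Instead of growing each LZ77 phrase one character at a time with a text.find per added character, B exploits that feasibility of a phrase length is monotone and finds each phrase length by exponential (galloping) then binary search, O(log L) find() calls per phrase instead of O(L).
import Mathlib
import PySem

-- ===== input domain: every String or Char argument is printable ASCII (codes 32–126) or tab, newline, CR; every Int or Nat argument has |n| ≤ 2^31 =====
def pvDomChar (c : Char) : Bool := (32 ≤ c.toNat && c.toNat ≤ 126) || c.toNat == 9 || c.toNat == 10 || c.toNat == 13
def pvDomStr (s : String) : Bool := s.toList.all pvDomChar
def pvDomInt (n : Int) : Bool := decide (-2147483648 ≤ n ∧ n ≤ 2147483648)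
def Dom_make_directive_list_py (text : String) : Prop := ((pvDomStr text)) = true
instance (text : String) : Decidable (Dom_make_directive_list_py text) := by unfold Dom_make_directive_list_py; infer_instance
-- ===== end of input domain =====

-- B replaces A's one-character-at-a-time phrase extension (one text.find per added
-- character) with an exponential-then-binary search over the phrase length
-- (feasibility of a length is monotone): an alternative algorithm of similar cost.
-- Loops are ported with a fuel parameter for structural termination only; every
-- call below passes fuel that provably exceeds the number of iterations.

-- ===== PORT A =====
-- inner 'for end in range(begin+1, len(text)+1)' loop of A, with its running state
-- (e = end, index, subtext, ch); text[begin:end] is (cs.drop begin).take (end-begin)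
-- (PySem.List.slice_natCast), text.find is PySem.Chars.find on the list side.
def mdlA_inner (cs : List Char) (b : Nat) :
    Nat → Nat → Int → List Char → Option String → Int × List Char × Option String
  | 0, _, index, subtext, ch => (index, subtext, ch)
  | m + 1, e, index, subtext, ch =>
    if e ≤ cs.length then
      let new_subtext := (cs.drop b).take (e - b)
      let new_index := PySem.Chars.find cs new_subtext
      if new_index = -1 ∨ new_index + (new_subtext.length : Int) > (b : Int) then
        (index, subtext, ch)
      else
        mdlA_inner cs b m (e + 1) new_index new_subtext none
    else (index, subtext, ch)

-- outer 'while begin < len(text)' loop of A (at most cs.length iterations: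
-- begin advances by len(subtext) ≥ 1 each time; the inner for-loop makes at most
-- cs.length + 1 - begin checks)
def mdlA_outer (cs : List Char) : Nat → Nat → List (Int × Int × Option String)
  | 0, _ => []
  | m + 1, b =>
    if h : b < cs.length then
      let r := mdlA_inner cs b (cs.length + 1) (b + 1) (b : Int) [cs[b]]
        (some (String.ofList [cs[b]]))
      (r.1, r.1 + (r.2.1.length : Int), r.2.2) :: mdlA_outer cs m (b + r.2.1.length)
    else []

def make_directive_list_py (text : String) : List (Int × Int × Option String) :=
  mdlA_outer text.toList text.toList.length 0

-- ===== PORT B =====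
-- gallop: 'while lo + step <= limit and text.find(text[begin:begin+lo+step]) + lo + step <= begin'
-- of Source B, returning the final (lo, step); lo grows by at least 1 per iteration
def mdlB_gallop (cs : List Char) (b : Nat) (limit : Nat) : Nat → Nat → Nat → Nat × Nat
  | 0, lo, step => (lo, step)
  | m + 1, lo, step =>
    if lo + step ≤ limit ∧
        PySem.Chars.find cs ((cs.drop b).take (lo + step)) + ((lo + step : Nat) : Int) ≤ (b : Int) then
      mdlB_gallop cs b limit m (lo + step) (step * 2)
    else (lo, step)

-- binary search: 'while lo < hi' of Source B; (lo+hi+1)//2 on nonnegative ints is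
-- Nat division; hi - lo shrinks every iteration
def mdlB_bs (cs : List Char) (b : Nat) : Nat → Nat → Nat → Nat
  | 0, lo, _ => lo
  | m + 1, lo, hi =>
    if lo < hi then
      let mid := (lo + hi + 1) / 2
      if PySem.Chars.find cs ((cs.drop b).take mid) + (mid : Int) ≤ (b : Int) then
        mdlB_bs cs b m mid hi
      else
        mdlB_bs cs b m lo (mid - 1)
    else lo

-- the phrase length Source B settles on: gallop from (lo, step) = (0, 1), then
-- binary search on (lo, min(lo + step - 1, limit)) with limit = n - begin
def mdlB_len (cs : List Char) (b : Nat) : Nat :=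
  mdlB_bs cs b (cs.length - b + 1)
    (mdlB_gallop cs b (cs.length - b) (cs.length - b + 1) 0 1).1
    (min ((mdlB_gallop cs b (cs.length - b) (cs.length - b + 1) 0 1).1 +
          (mdlB_gallop cs b (cs.length - b) (cs.length - b + 1) 0 1).2 - 1) (cs.length - b))

-- outer 'while begin < n' loop of B
def mdlB_outer (cs : List Char) : Nat → Nat → List (Int × Int × Option String)
  | 0, _ => []
  | m + 1, b =>
    if h : b < cs.length then
      if hL : mdlB_len cs b = 0 then
        ((b : Int), (b : Int) + 1, some (String.ofList [cs[b]])) :: mdlB_outer cs m (b + 1)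
      else
        (PySem.Chars.find cs ((cs.drop b).take (mdlB_len cs b)),
         PySem.Chars.find cs ((cs.drop b).take (mdlB_len cs b)) + ((mdlB_len cs b : Nat) : Int),
         none) :: mdlB_outer cs m (b + mdlB_len cs b)
    else []

def make_directive_list_py_alt (text : String) : List (Int × Int × Option String) :=
  mdlB_outer text.toList text.toList.length 0

-- ===== PRECONDITION & SPEC =====
def Spec_make_directive_list_py (text : String) (out : List (Int × Int × Option String)) : Prop := out = make_directive_list_py_alt text
instance (text : String) (out : List (Int × Int × Option String)) : Decidable (Spec_make_directive_list_py text out) := by unfold Spec_make_directive_list_py; infer_instance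

-- ===== CLAIM (what is proved, stated in full; the proofs are below) =====
def Claim_equal_make_directive_list_py : Prop := ∀ (text : String), Dom_make_directive_list_py text → Spec_make_directive_list_py text (make_directive_list_py text)

-- ===== LEMMAS AND PROOFS =====

-- feasibility of phrase length ℓ at position b: the leftmost occurrence of
-- text[b:b+ℓ] ends at or before b
def lzP (cs : List Char) (b ℓ : Nat) : Prop :=
  PySem.Chars.find cs ((cs.drop b).take ℓ) + (ℓ : Int) ≤ (b : Int)

lemma lzP_zero (cs : List Char) (b : Nat) : lzP cs b 0 := by
  simp [lzP, PySem.Chars.find_nil]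

lemma lz_sub_infix (cs : List Char) (b ℓ : Nat) : (cs.drop b).take ℓ <:+: cs :=
  ((cs.drop b).take_prefix ℓ).isInfix.trans (cs.drop_suffix b).isInfix

lemma lz_find_nonneg (cs : List Char) (b ℓ : Nat) :
    0 ≤ PySem.Chars.find cs ((cs.drop b).take ℓ) :=
  (PySem.Chars.find_nonneg_iff cs _).2 (lz_sub_infix cs b ℓ)

-- monotonicity of feasibility
lemma lzP_mono (cs : List Char) (b : Nat) {ℓ' ℓ : Nat} (hle : ℓ' ≤ ℓ)
    (h : lzP cs b ℓ) : lzP cs b ℓ' := by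
  have hi := lz_find_nonneg cs b ℓ
  have hspec := PySem.Chars.find_spec hi
  have hj := lz_find_nonneg cs b ℓ'
  have hspec' := PySem.Chars.find_spec hj
  -- the shorter prefix occurs where the longer does
  have hsub : (cs.drop b).take ℓ' <+: (cs.drop b).take ℓ := by
    have heq : (cs.drop b).take ℓ' = ((cs.drop b).take ℓ).take ℓ' := by
      rw [List.take_take, Nat.min_eq_left hle]
    rw [heq]; exact List.take_prefix _ _
  have hocc : (cs.drop b).take ℓ' <+:
      cs.drop (PySem.Chars.find cs ((cs.drop b).take ℓ)).toNat :=
    hsub.trans hspec.1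
  -- hence its leftmost occurrence is not later
  have hle2 : (PySem.Chars.find cs ((cs.drop b).take ℓ')).toNat ≤
      (PySem.Chars.find cs ((cs.drop b).take ℓ)).toNat := by
    by_contra hgt
    exact hspec'.2 _ (by omega) hocc
  unfold lzP at h ⊢
  omega

-- the characterisation both inner loops compute: the largest feasible length ≤ limit
def lzMax (cs : List Char) (b L : Nat) : Prop :=
  lzP cs b L ∧ L ≤ cs.length - b ∧ ∀ ℓ, ℓ ≤ cs.length - b → lzP cs b ℓ → ℓ ≤ L

lemma lzMax_unique (cs : List Char) (b : Nat) {L1 L2 : Nat}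
    (h1 : lzMax cs b L1) (h2 : lzMax cs b L2) : L1 = L2 :=
  Nat.le_antisymm (h2.2.2 _ h1.2.1 h1.1) (h1.2.2 _ h2.2.1 h2.1)

-- A's inner loop computes the largest feasible length
lemma mdlA_inner_correct (cs : List Char) (b : Nat) :
    ∀ m k, cs.length - b - k < m → 1 ≤ k → b + k ≤ cs.length → lzP cs b k →
      ∃ L, lzMax cs b L ∧
        mdlA_inner cs b m (b + k + 1) (PySem.Chars.find cs ((cs.drop b).take k))
          ((cs.drop b).take k) none =
        (PySem.Chars.find cs ((cs.drop b).take L), (cs.drop b).take L, none) := by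
  intro m
  induction m with
  | zero =>
    intro k hm
    exact absurd hm (by omega)
  | succ m ih =>
    intro k hm hk hbk hP
    by_cases hend : b + k + 1 ≤ cs.length
    · -- one more candidate length k+1
      have harith : b + k + 1 - b = k + 1 := by omega
      have hlenNat : ((cs.drop b).take (k + 1)).length = k + 1 := by
        rw [List.length_take, List.length_drop]; omega
      by_cases hP1 : lzP cs b (k + 1)
      · -- accepted: recurse
        obtain ⟨L, hmax, heq⟩ := ih (k + 1) (by omega) (by omega) (by omega) hP1
        refine ⟨L, hmax, ?_⟩
        rw [mdlA_inner]
        simp only [hend, if_true, harith]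
        have hfe : PySem.Chars.find cs ((cs.drop b).take (k + 1)) +
            (((cs.drop b).take (k + 1)).length : Int) ≤ (b : Int) := by
          rw [hlenNat]; exact hP1
        have hcond : ¬ (PySem.Chars.find cs ((cs.drop b).take (k + 1)) = -1 ∨
            PySem.Chars.find cs ((cs.drop b).take (k + 1)) +
              (((cs.drop b).take (k + 1)).length : Int) > (b : Int)) := by
          refine not_or.mpr ⟨?_, not_lt.mpr hfe⟩
          have := lz_find_nonneg cs b (k + 1)
          omega
        rw [if_neg hcond]
        have h2 : b + k + 1 + 1 = b + (k + 1) + 1 := by omega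
        rw [h2]
        exact heq
      · -- rejected: k is the largest feasible length
        refine ⟨k, ⟨hP, by omega, fun ℓ hℓ hPℓ => ?_⟩, ?_⟩
        · by_contra hgt
          exact hP1 (lzP_mono cs b (by omega) hPℓ)
        · rw [mdlA_inner]
          simp only [hend, if_true, harith]
          have h2 : PySem.Chars.find cs ((cs.drop b).take (k + 1)) +
              (((cs.drop b).take (k + 1)).length : Int) > (b : Int) := by
            rw [hlenNat]
            unfold lzP at hP1
            omega
          rw [if_pos (Or.inr h2)]
    · -- range exhausted: k = cs.length - b
      refine ⟨k, ⟨hP, by omega, fun ℓ hℓ _ => by omega⟩, ?_⟩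
      rw [mdlA_inner]
      simp only [hend, if_false]

-- B's binary search keeps 'lo feasible, everything feasible ≤ hi'
lemma mdlB_bs_correct (cs : List Char) (b : Nat) :
    ∀ m lo hi, hi - lo ≤ m → lo ≤ hi → hi ≤ cs.length - b → lzP cs b lo →
      (∀ ℓ, ℓ ≤ cs.length - b → lzP cs b ℓ → ℓ ≤ hi) →
      lzMax cs b (mdlB_bs cs b m lo hi) := by
  intro m
  induction m with
  | zero =>
    intro lo hi hm hlh hhi hPlo hbound
    have heq : lo = hi := by omega
    rw [mdlB_bs]
    exact ⟨hPlo, by omega, heq ▸ hbound⟩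
  | succ m ih =>
    intro lo hi hm hlh hhi hPlo hbound
    rw [mdlB_bs]
    by_cases hlt : lo < hi
    · simp only [hlt, if_true]
      by_cases hPm : lzP cs b ((lo + hi + 1) / 2)
      · have hc : PySem.Chars.find cs ((cs.drop b).take ((lo + hi + 1) / 2)) +
            (((lo + hi + 1) / 2 : Nat) : Int) ≤ (b : Int) := hPm
        rw [if_pos hc]
        exact ih ((lo + hi + 1) / 2) hi (by omega) (by omega) hhi hPm hbound
      · have hc : ¬ (PySem.Chars.find cs ((cs.drop b).take ((lo + hi + 1) / 2)) +
            (((lo + hi + 1) / 2 : Nat) : Int) ≤ (b : Int)) := hPm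
        rw [if_neg hc]
        refine ih lo ((lo + hi + 1) / 2 - 1) (by omega) (by omega) (by omega) hPlo ?_
        intro ℓ hℓ hPℓ
        by_contra hgt
        exact hPm (lzP_mono cs b (by omega) hPℓ)
    · simp only [hlt, if_false]
      have heq : lo = hi := by omega
      exact ⟨hPlo, by omega, heq ▸ hbound⟩

-- B's gallop establishes the binary-search invariant
lemma mdlB_gallop_correct (cs : List Char) (b : Nat) :
    ∀ m lo step, cs.length - b + 1 - lo ≤ m → 1 ≤ step → lo ≤ cs.length - b → lzP cs b lo →
      1 ≤ (mdlB_gallop cs b (cs.length - b) m lo step).2 ∧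
      (mdlB_gallop cs b (cs.length - b) m lo step).1 ≤ cs.length - b ∧
      lzP cs b (mdlB_gallop cs b (cs.length - b) m lo step).1 ∧
      (∀ ℓ, ℓ ≤ cs.length - b → lzP cs b ℓ →
        ℓ ≤ min ((mdlB_gallop cs b (cs.length - b) m lo step).1 +
                 (mdlB_gallop cs b (cs.length - b) m lo step).2 - 1) (cs.length - b)) := by
  intro m
  induction m with
  | zero =>
    intro lo step hm hstep hlo hPlo
    exact absurd hm (by omega)
  | succ m ih =>
    intro lo step hm hstep hlo hPlo
    rw [mdlB_gallop]
    by_cases hc : lo + step ≤ cs.length - b ∧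
        PySem.Chars.find cs ((cs.drop b).take (lo + step)) + ((lo + step : Nat) : Int) ≤ (b : Int)
    · rw [if_pos hc]
      exact ih (lo + step) (step * 2) (by omega) (by omega) hc.1 hc.2
    · rw [if_neg hc]
      refine ⟨hstep, hlo, hPlo, fun ℓ hℓ hPℓ => ?_⟩
      by_cases hin : lo + step ≤ cs.length - b
      · -- gallop stopped because lo + step is infeasible
        have hnP : ¬ lzP cs b (lo + step) := fun h => hc ⟨hin, h⟩
        have : ℓ < lo + step := by
          by_contra hge
          exact hnP (lzP_mono cs b (by omega) hPℓ)
        omega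
      · omega

-- Source B's phrase length is the largest feasible length
lemma mdlB_len_max (cs : List Char) (b : Nat) : lzMax cs b (mdlB_len cs b) := by
  have hg := mdlB_gallop_correct cs b (cs.length - b + 1) 0 1 (by omega) (le_refl _)
    (by omega) (lzP_zero cs b)
  obtain ⟨hg1, hg2, hg3, hg4⟩ := hg
  exact mdlB_bs_correct cs b (cs.length - b + 1) _ _ (by omega) (by omega) (by omega) hg3 hg4

-- the two outer loops agree (fuel m suffices for both once cs.length - b ≤ m)
lemma outer_eq (cs : List Char) :
    ∀ m b, cs.length - b ≤ m → mdlA_outer cs m b = mdlB_outer cs m b := by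
  intro m
  induction m with
  | zero =>
    intro b hm
    rfl
  | succ m ih =>
    intro b hm
    by_cases hb : b < cs.length
    · -- text[b:b+1] = [cs[b]]
      have hsub1 : (cs.drop b).take 1 = [cs[b]] := by
        rw [List.drop_eq_getElem_cons hb]
        rfl
      have harith1 : b + 1 - b = 1 := by omega
      have hlen1 : ((cs.drop b).take 1).length = 1 := by rw [hsub1]; rfl
      have hin : b + 1 ≤ cs.length := by omega
      by_cases hP1 : lzP cs b 1
      · -- both copy a phrase
        obtain ⟨LA, hmaxA, heqA⟩ := mdlA_inner_correct cs b cs.length 1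
          (by omega) (le_refl _) (by omega) hP1
        have hLeq : LA = mdlB_len cs b := lzMax_unique cs b hmaxA (mdlB_len_max cs b)
        have hL1 : 1 ≤ LA := hmaxA.2.2 1 (by omega) hP1
        rw [mdlA_outer, mdlB_outer, dif_pos hb, dif_pos hb]
        have hLne : ¬ mdlB_len cs b = 0 := by omega
        rw [dif_neg hLne]
        -- evaluate A's first inner step
        rw [mdlA_inner]
        simp only [hin, if_true, harith1]
        have hfe : PySem.Chars.find cs ((cs.drop b).take 1) +
            (((cs.drop b).take 1).length : Int) ≤ (b : Int) := by
          rw [hlen1]; exact hP1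
        have hcond : ¬ (PySem.Chars.find cs ((cs.drop b).take 1) = -1 ∨
            PySem.Chars.find cs ((cs.drop b).take 1) +
              (((cs.drop b).take 1).length : Int) > (b : Int)) := by
          refine not_or.mpr ⟨?_, not_lt.mpr hfe⟩
          have := lz_find_nonneg cs b 1
          omega
        rw [if_neg hcond]
        have heqA' : mdlA_inner cs b cs.length (b + 1 + 1)
            (PySem.Chars.find cs ((cs.drop b).take 1)) ((cs.drop b).take 1) none =
            (PySem.Chars.find cs ((cs.drop b).take LA), (cs.drop b).take LA, none) := heqA
        rw [heqA']
        have hlenL : ((cs.drop b).take LA).length = LA := by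
          have := hmaxA.2.1
          rw [List.length_take, List.length_drop]; omega
        rw [← hLeq] at *
        rw [hlenL, ih (b + LA) (by omega)]
      · -- both emit a literal character
        have hL0 : mdlB_len cs b = 0 := by
          by_contra hne
          exact hP1 (lzP_mono cs b (by omega) (mdlB_len_max cs b).1)
        rw [mdlA_outer, mdlB_outer, dif_pos hb, dif_pos hb, dif_pos hL0]
        rw [mdlA_inner]
        simp only [hin, if_true, harith1]
        have h2 : PySem.Chars.find cs ((cs.drop b).take 1) +
            (((cs.drop b).take 1).length : Int) > (b : Int) := by
          rw [hlen1]
          unfold lzP at hP1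
          omega
        rw [if_pos (Or.inr h2)]
        norm_num
        rw [ih (b + 1) (by omega)]
    · rw [mdlA_outer, mdlB_outer]
      simp only [hb, dif_neg, not_false_iff]

-- ===== VERDICT (by name: the statement is the Claim_ definition above) =====
theorem make_directive_list_py_spec : Claim_equal_make_directive_list_py := by
  intro text _
  unfold Spec_make_directive_list_py make_directive_list_py make_directive_list_py_alt
  exact outer_eq text.toList text.toList.length 0 (by omega)
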